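-- pv_equiv track=rewrite | github.com/heitorchang/learn-code | codefights/dp/maxDiscount.py | maxDiscount
-- ===== SOURCE A (Python) =====
-- def maxDiscount(prices):
--     len_prices = len(prices)
--     subproblem = [0 for _ in range(len_prices)]
--     best = 0
--
--     for i in range(2, len_prices):
--         if i > 4:
--             free_to_use = max(subproblem[:i-2])
--         else:
--             free_to_use = 0
--         cur_disc = min(prices[i-2:i+1])
--         best = max(best, cur_disc + free_to_use)
--         subproblem[i] = best
--     return best
-- ===== SOURCE B (Python) =====
-- def maxDiscount(prices):
--     # O(1) extra space: carry the best from three iterations ago instead of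
--     # rescanning the subproblem prefix; that prefix max always equals it.
--     best = b1 = b2 = b3 = 0
--     for i in range(2, len(prices)):
--         best = max(best, min(prices[i - 2], prices[i - 1], prices[i]) + b3)
--         b3, b2, b1 = b2, b1, best
--     return best
-- ===== Notes on version B (the rewrite author's own statement) =====
-- stated objective: faster
-- what changed: B drops the subproblem array entirely and carries the best value from three iterations ago in O(1) state, since A's rescanned prefix max(subproblem[:i-2]) always equals that value; the inner min over a slice becomes a 3-way min.
import Mathlib
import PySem

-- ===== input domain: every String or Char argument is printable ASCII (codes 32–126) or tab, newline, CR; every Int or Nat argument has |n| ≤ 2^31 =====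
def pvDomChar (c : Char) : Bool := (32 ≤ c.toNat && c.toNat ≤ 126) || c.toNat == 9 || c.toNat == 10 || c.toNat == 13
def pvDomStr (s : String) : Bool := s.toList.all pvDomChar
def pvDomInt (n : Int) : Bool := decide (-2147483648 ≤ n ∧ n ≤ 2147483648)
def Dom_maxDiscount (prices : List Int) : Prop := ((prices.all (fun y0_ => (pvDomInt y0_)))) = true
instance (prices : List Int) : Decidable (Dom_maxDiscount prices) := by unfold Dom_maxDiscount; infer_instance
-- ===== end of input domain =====

-- B replaces A's O(n) rescan of the subproblem prefix by the best value carried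
-- from three iterations ago (objective: faster, O(n^2) → O(n)).

-- ===== PORT A =====
-- loop body of A's for-loop, state = (subproblem, best)
def maxDiscountStep (prices : List Int) (st : List Int × Int) (i : Int) : List Int × Int :=
  let free_to_use : Int :=
    if i > 4 then
      -- Python's max(subproblem[:i-2]); the slice is nonempty whenever 4 < i < len(prices), so the default is never used
      (PySem.List.max? (PySem.List.slice st.1 none (some (i - 2))) (fun x => x)).getD 0
    else 0
  let cur_disc : Int :=
    -- Python's min(prices[i-2:i+1]); nonempty since 2 ≤ i < len(prices), so the default is never used
    (PySem.List.min? (PySem.List.slice prices (some (i - 2)) (some (i + 1))) (fun x => x)).getD 0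
  let best := max st.2 (cur_disc + free_to_use)
  (PySem.List.pySetD st.1 i best, best)

def maxDiscount (prices : List Int) : Int :=
  let lenPrices := PySem.List.len prices
  let subproblem : List Int := (PySem.List.pyRange 0 lenPrices 1).map (fun _ => (0 : Int))
  ((PySem.List.pyRange 2 lenPrices 1).foldl (maxDiscountStep prices) (subproblem, 0)).2

-- ===== PORT B =====
-- loop body of B's for-loop, state = (best, b1, b2, b3)
def maxDiscountAltStep (prices : List Int) (st : Int × Int × Int × Int) (i : Int) : Int × Int × Int × Int :=
  let best := max st.1
    (min (PySem.List.pyGetD prices (i - 2) 0)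
      (min (PySem.List.pyGetD prices (i - 1) 0) (PySem.List.pyGetD prices i 0)) + st.2.2.2)
  (best, best, st.2.1, st.2.2.1)

def maxDiscount_alt (prices : List Int) : Int :=
  ((PySem.List.pyRange 2 (PySem.List.len prices) 1).foldl (maxDiscountAltStep prices) (0, 0, 0, 0)).1

-- ===== PRECONDITION & SPEC =====
def Spec_maxDiscount (prices : List Int) (out : Int) : Prop := out = maxDiscount_alt prices
instance (prices : List Int) (out : Int) : Decidable (Spec_maxDiscount prices out) := by unfold Spec_maxDiscount; infer_instance

-- ===== CLAIM (what is proved, stated in full; the proofs are below) =====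
def Claim_equal_maxDiscount : Prop := ∀ (prices : List Int), Dom_maxDiscount prices → Spec_maxDiscount prices (maxDiscount prices)

-- ===== LEMMAS AND PROOFS =====

-- the coupling invariant after the loops have processed i = 2, …, m-1
def pvInv (prices : List Int) (m : Nat) (sa : List Int × Int) (sb : Int × Int × Int × Int) : Prop :=
  sa.1.length = prices.length ∧
  sa.1.getD 0 0 = 0 ∧ sa.1.getD 1 0 = 0 ∧
  sb.1 = sa.2 ∧
  sb.2.1 = sa.1.getD (m-1) 0 ∧ sb.2.2.1 = sa.1.getD (m-2) 0 ∧ sb.2.2.2 = sa.1.getD (m-3) 0 ∧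
  sa.2 = sa.1.getD (m-1) 0 ∧
  (∀ j k : Nat, j ≤ k → k < m → sa.1.getD j 0 ≤ sa.1.getD k 0)


lemma pv_getD_set_self (xs : List Int) (n : Nat) (v : Int) (h : n < xs.length) :
    (xs.set n v).getD n 0 = v := by
  simp [List.getD_eq_getElem?_getD, h]

lemma pv_getD_set_ne (xs : List Int) (n j : Nat) (v : Int) (h : j ≠ n) :
    (xs.set n v).getD j 0 = xs.getD j 0 := by
  simp [List.getD_eq_getElem?_getD, List.getElem?_set_ne (Ne.symm h)]

lemma pv_max?_take (xs : List Int) (k : Nat) (h0 : 0 < k) (hk : k ≤ xs.length)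
    (mono : ∀ j : Nat, j < k → xs.getD j 0 ≤ xs.getD (k-1) 0) :
    (PySem.List.max? (xs.take k) (fun x => x)).getD 0 = xs.getD (k-1) 0 := by
  have hne : xs.take k ≠ [] := List.ne_nil_of_length_pos (by simp; omega)
  cases hM : PySem.List.max? (xs.take k) (fun x => x) with
  | none => exact absurd ((PySem.List.max?_eq_none_iff _ _).mp hM) hne
  | some M =>
    have hmem : M ∈ xs.take k := PySem.List.max?_mem hM
    have hmax := PySem.List.max?_isMax hM
    obtain ⟨j, hj, hje⟩ := List.getElem_of_mem hmem
    have hjk : j < k := by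
      have := List.length_take (l := xs) (i := k) ▸ hj
      omega
    have hxj : (xs.take k)[j] = xs[j]'(by omega) := List.getElem_take
    have h1 : M ≤ xs.getD (k-1) 0 := by
      rw [← hje, hxj, ← List.getD_eq_getElem xs 0 (by omega)]
      exact mono j hjk
    have h2 : xs.getD (k-1) 0 ≤ M := by
      have hmem2 : xs.getD (k-1) 0 ∈ xs.take k := by
        rw [List.getD_eq_getElem xs 0 (by omega)]
        have heq : (xs.take k)[k-1]'(by simp; omega) = xs[k-1]'(by omega) := List.getElem_take
        rw [← heq]
        exact List.getElem_mem _
      exact hmax _ hmem2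
    simpa using le_antisymm h1 h2

lemma pv_take3_drop (xs : List Int) (k : Nat) (h : k + 2 < xs.length) :
    (xs.drop k).take 3 = [xs.getD k 0, xs.getD (k+1) 0, xs.getD (k+2) 0] := by
  apply List.ext_getElem
  · simp; omega
  · intro i h1 h2
    simp at h2
    interval_cases i <;>
      simp [List.getD_eq_getElem?_getD, List.getElem?_eq_getElem (by omega : k < xs.length),
        List.getElem?_eq_getElem (by omega : k+1 < xs.length),
        List.getElem?_eq_getElem (by omega : k+2 < xs.length)]

lemma pv_step (prices : List Int) (m : Nat) (hm : 2 ≤ m) (hmn : m < prices.length)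
    (sa : List Int × Int) (sb : Int × Int × Int × Int) (h : pvInv prices m sa sb) :
    pvInv prices (m+1) (maxDiscountStep prices sa (m : Int)) (maxDiscountAltStep prices sb (m : Int)) := by
  obtain ⟨hlen, h0, h1, hb, hb1, hb2, hb3, hbest, hmono⟩ := h
  have hc2 : (m : Int) - 2 = ((m - 2 : Nat) : Int) := by omega
  have hc1 : (m : Int) - 1 = ((m - 1 : Nat) : Int) := by omega
  have hcp : (m : Int) + 1 = ((m + 1 : Nat) : Int) := by push_cast; ring
  have free_eq :
      (if (m : Int) > 4 then
        (PySem.List.max? (PySem.List.slice sa.1 none (some ((m : Int) - 2))) (fun x => x)).getD 0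
      else 0) = sa.1.getD (m - 3) 0 := by
    by_cases h4 : (m : Int) > 4
    · rw [if_pos h4, hc2, PySem.List.slice_to_natCast]
      have hm5 : 5 ≤ m := by omega
      have := pv_max?_take sa.1 (m - 2) (by omega) (by omega)
        (fun j hj => hmono j (m - 3) (by omega) (by omega))
      rwa [show m - 2 - 1 = m - 3 from by omega] at this
    · rw [if_neg h4]
      have hm4 : m ≤ 4 := by omega
      interval_cases m <;> simp_all
  have cur_eq :
      (PySem.List.min? (PySem.List.slice prices (some ((m : Int) - 2)) (some ((m : Int) + 1))) (fun x => x)).getD 0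
        = min (prices.getD (m - 2) 0) (min (prices.getD (m - 1) 0) (prices.getD m 0)) := by
    rw [hc2, hcp, PySem.List.slice_natCast, show m + 1 - (m - 2) = 3 from by omega,
      pv_take3_drop prices (m - 2) (by omega),
      show m - 2 + 1 = m - 1 from by omega, show m - 2 + 2 = m from by omega,
      PySem.List.min?_id_cons]
    simp [min_assoc]
  have hget2 : PySem.List.pyGetD prices ((m : Int) - 2) 0 = prices.getD (m - 2) 0 := by
    rw [hc2, PySem.List.pyGetD_natCast]
  have hget1 : PySem.List.pyGetD prices ((m : Int) - 1) 0 = prices.getD (m - 1) 0 := by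
    rw [hc1, PySem.List.pyGetD_natCast]
  have hget0 : PySem.List.pyGetD prices ((m : Int)) 0 = prices.getD m 0 := by
    rw [PySem.List.pyGetD_natCast]
  simp only [maxDiscountStep, maxDiscountAltStep, free_eq, cur_eq, hget2, hget1, hget0,
    PySem.List.pySetD_natCast]
  set C : Int := min (prices.getD (m - 2) 0) (min (prices.getD (m - 1) 0) (prices.getD m 0)) with hC
  have hkey : max sb.1 (C + sb.2.2.2) = max sa.2 (C + sa.1.getD (m - 3) 0) := by
    rw [hb, hb3]
  set B : Int := max sa.2 (C + sa.1.getD (m - 3) 0) with hB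
  have hmlen : m < sa.1.length := by omega
  have hself : (sa.1.set m B).getD m 0 = B := pv_getD_set_self _ _ _ hmlen
  refine ⟨by simpa using hlen, ?_, ?_, ?_, ?_, ?_, ?_, ?_, ?_⟩
  · rw [pv_getD_set_ne _ _ _ _ (by omega)]; exact h0
  · rw [pv_getD_set_ne _ _ _ _ (by omega)]; exact h1
  · exact hkey
  · show max sb.1 (C + sb.2.2.2) = (sa.1.set m B).getD (m + 1 - 1) 0
    rw [show m + 1 - 1 = m from by omega, hself, hkey]
  · show sb.2.1 = (sa.1.set m B).getD (m + 1 - 2) 0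
    rw [show m + 1 - 2 = m - 1 from by omega, pv_getD_set_ne _ _ _ _ (by omega)]
    exact hb1
  · show sb.2.2.1 = (sa.1.set m B).getD (m + 1 - 3) 0
    rw [show m + 1 - 3 = m - 2 from by omega, pv_getD_set_ne _ _ _ _ (by omega)]
    exact hb2
  · show B = (sa.1.set m B).getD (m + 1 - 1) 0
    rw [show m + 1 - 1 = m from by omega, hself]
  · intro j' k' hjk' hk'
    by_cases hkm : k' = m
    · rw [hkm]
      by_cases hjm : j' = m
      · rw [hjm, hself]
      · rw [pv_getD_set_ne _ _ _ _ hjm, hself]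
        calc sa.1.getD j' 0 ≤ sa.1.getD (m - 1) 0 := hmono j' (m - 1) (by omega) (by omega)
          _ = sa.2 := hbest.symm
          _ ≤ B := le_max_left _ _
    · rw [pv_getD_set_ne _ _ _ _ (by omega : j' ≠ m), pv_getD_set_ne _ _ _ _ hkm]
      exact hmono j' k' hjk' (by omega)

lemma pv_fold (prices : List Int) (m : Nat) (hm : 2 ≤ m) (hmn : m ≤ prices.length) :
    pvInv prices m
      ((PySem.List.pyRange 2 (m : Int) 1).foldl (maxDiscountStep prices)
        ((PySem.List.pyRange 0 (PySem.List.len prices) 1).map (fun _ => (0 : Int)), 0))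
      ((PySem.List.pyRange 2 (m : Int) 1).foldl (maxDiscountAltStep prices) (0, 0, 0, 0)) := by
  induction m, hm using Nat.le_induction with
  | base =>
    rw [show PySem.List.pyRange 2 ((2:Nat):Int) 1 = [] from PySem.List.pyRange_one_eq_nil (by norm_num)]
    simp only [List.foldl_nil]
    have hz : ∀ j : Nat, ((PySem.List.pyRange 0 (PySem.List.len prices) 1).map
        (fun _ => (0 : Int))).getD j 0 = 0 := by
      intro j
      simp [List.getD_eq_getElem?_getD]
    refine ⟨?_, hz 0, hz 1, rfl, (hz 1).symm, (hz 0).symm, (hz 0).symm, (hz 1).symm,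
      fun j k _ _ => by rw [hz j, hz k]⟩
    simp [PySem.List.length_pyRange_one]
  | succ m hm ih =>
    rw [show ((m + 1 : Nat) : Int) = (m : Int) + 1 from by push_cast; ring,
      PySem.List.pyRange_one_succ_right (by omega), List.foldl_append, List.foldl_append]
    simp only [List.foldl_cons, List.foldl_nil]
    exact pv_step prices m hm (by omega) _ _ (ih (by omega))

-- ===== VERDICT (by name: the statement is the Claim_ definition above) =====
theorem maxDiscount_spec : Claim_equal_maxDiscount := by
  intro prices _
  unfold Spec_maxDiscount maxDiscount maxDiscount_alt
  dsimp only
  by_cases h2 : 2 ≤ prices.length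
  · have := pv_fold prices prices.length h2 le_rfl
    obtain ⟨-, -, -, hb, -, -, -, -, -⟩ := this
    simp only [PySem.List.len_eq] at hb ⊢
    exact hb.symm
  · have hnil : PySem.List.pyRange 2 (PySem.List.len prices) 1 = [] :=
      PySem.List.pyRange_one_eq_nil (by simp; omega)
    rw [hnil]
    rfl
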